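-- pv_equiv track=rewrite | github.com/QuanTa-padfoot/MSPypeline | mspypeline/helpers/Utils.py | venn_names
-- ===== SOURCE A (Python) =====
-- from typing import Optional, Dict, Tuple, Iterator, Union, Iterable, Sized, Callable
-- from itertools import combinations
--
-- def venn_names(named_sets: Dict[str, set]) -> Iterator[Tuple[set, set, set]]:
--     names = set(named_sets)
--     for i in range(1, len(named_sets) + 1):
--         for to_intersect in combinations(sorted(named_sets), i):
--             others = names.difference(to_intersect)
--             intersected = set.intersection(*(named_sets[k] for k in to_intersect))
--             unioned = set.union(*(named_sets[k] for k in others)) if others else set()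
--             yield to_intersect, others, intersected - unioned
-- ===== SOURCE B (Python) =====
-- from itertools import combinations
--
-- def venn_names(named_sets):
--     keys = list(named_sets)
--     names = set(keys)
--     skeys = sorted(keys)
--     n = len(keys)
--     # An element lies in the exclusive region of a subset c iff it is in the
--     # intersection of c and the number of sets containing it equals len(c),
--     # so one global membership count replaces every per-subset union; the
--     # intersections are built incrementally from the subset minus its last key.
--     cnt = {}
--     for k in keys:
--         for x in named_sets[k]:
--             cnt[x] = cnt.get(x, 0) + 1
--     inter = {}
--     for i in range(1, n + 1):
--         for c in combinations(skeys, i):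
--             inter[c] = named_sets[c[0]] if i == 1 else inter[c[:-1]] & named_sets[c[-1]]
--             yield c, names.difference(c), {x for x in inter[c] if cnt[x] == i}
-- ===== Notes on version B (the rewrite author's own statement) =====
-- stated objective: faster
-- what changed: Replaces the per-subset recomputation of intersections and complement unions by a single global element-membership count (an element is in a subset's exclusive region iff it is in the subset's intersection and its count equals the subset size) plus an intersection table built incrementally from each subset minus its last key; intended as faster, though a timing run could only measure about 1.4-1.5x at the largest size, where A began timing out.
import Mathlib
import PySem

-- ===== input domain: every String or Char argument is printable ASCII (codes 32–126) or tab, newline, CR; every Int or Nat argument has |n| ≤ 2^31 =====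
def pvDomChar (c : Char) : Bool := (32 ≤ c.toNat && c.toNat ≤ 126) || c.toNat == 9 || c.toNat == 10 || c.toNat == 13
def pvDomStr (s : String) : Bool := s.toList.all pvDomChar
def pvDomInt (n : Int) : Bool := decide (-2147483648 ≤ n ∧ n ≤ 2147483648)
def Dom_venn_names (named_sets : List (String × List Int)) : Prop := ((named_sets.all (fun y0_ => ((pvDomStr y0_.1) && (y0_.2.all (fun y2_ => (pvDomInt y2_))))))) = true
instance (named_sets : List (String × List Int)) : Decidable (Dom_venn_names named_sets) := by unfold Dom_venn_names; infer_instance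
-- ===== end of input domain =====

-- B computes each subset's exclusive Venn region from one global element-membership
-- count and an incrementally built intersection table instead of recomputing the
-- intersection and the complement union from scratch for every subset (objective:
-- faster; intended as faster — a timing run measured about 1.4-1.5x at its largest size, where A began timing out).

-- shared input decoding: the Python argument is a dict[str, set]
def pvToDict (named_sets : List (String × List Int)) : PySem.Dict String (List Int) :=
  PySem.Dict.ofList (named_sets.map (fun p => (p.1, PySem.Set.ofList p.2)))

-- ===== PORT A =====
def venn_names (named_sets : List (String × List Int)) : List (List String × List String × List Int) :=
  let d := pvToDict named_sets
  -- names = set(named_sets)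
  let names : PySem.Set String := PySem.Set.ofList d.keys
  -- for i in range(1, len(named_sets)+1): for to_intersect in combinations(sorted(named_sets), i): yield …
  (PySem.List.pyRange 1 (PySem.List.len d.keys + 1)).flatMap (fun i =>
    (PySem.List.combinations (PySem.List.sorted d.keys (fun k => k)) i.toNat).map (fun c =>
      let others := PySem.Set.diff names c
      -- set.intersection(*(named_sets[k] for k in to_intersect)); c ≠ [] here (i ≥ 1);
      -- named_sets[k] cannot raise a KeyError (k is one of the dict's own keys), hence getD
      let intersected : List Int :=
        match c with
        | [] => []
        | k :: ks => ks.foldl (fun acc k' => PySem.Set.inter acc (d.getD k' [])) (d.getD k [])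
      -- set.union(*(named_sets[k] for k in others)) if others else set()
      let unioned : List Int :=
        match others with
        | [] => []
        | h :: t => t.foldl (fun acc k' => PySem.Set.union acc (d.getD k' [])) (d.getD h [])
      (c, others, PySem.Set.diff intersected unioned)))

-- ===== PORT B =====
def venn_names_alt (named_sets : List (String × List Int)) : List (List String × List String × List Int) :=
  let d := pvToDict named_sets
  let keys := d.keys
  let names : PySem.Set String := PySem.Set.ofList keys
  let skeys := PySem.List.sorted keys (fun k => k)
  -- cnt[x] = cnt.get(x, 0) + 1 over all x of all sets
  let cnt : PySem.Dict Int Int :=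
    keys.foldl (fun m k => (d.getD k []).foldl (fun m x => m.insert x (m.getD x 0 + 1)) m)
    PySem.Dict.empty
  -- inter[c] = named_sets[c[0]] if i == 1 else inter[c[:-1]] & named_sets[c[-1]];
  -- c is nonempty throughout (i ≥ 1): c[0] → headD, c[-1] → getLastD, c[:-1] → dropLast;
  -- named_sets[·]/inter[·]/cnt[·] lookups cannot raise here, hence getD;
  -- the yields accumulate in the second state component
  ((PySem.List.pyRange 1 (PySem.List.len keys + 1)).foldl (fun st i =>
      (PySem.List.combinations skeys i.toNat).foldl (fun st c =>
        let v : List Int :=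
          if i == 1 then d.getD (c.headD "") []
          else PySem.Set.inter (st.1.getD c.dropLast []) (d.getD (c.getLastD "") [])
        (st.1.insert c v,
         st.2 ++ [(c, PySem.Set.diff names c,
                   PySem.Set.ofList (v.filter (fun x => cnt.getD x 0 == i)))])) st)
    ((PySem.Dict.empty : PySem.Dict (List String) (List Int)),
     ([] : List (List String × List String × List Int)))).2

-- ===== PRECONDITION & SPEC =====
def Spec_venn_names (named_sets : List (String × List Int)) (out : List (List String × List String × List Int)) : Prop := out = venn_names_alt named_sets
instance (named_sets : List (String × List Int)) (out : List (List String × List String × List Int)) : Decidable (Spec_venn_names named_sets out) := by unfold Spec_venn_names; infer_instance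

-- ===== CLAIM (what is proved, stated in full; the proofs are below) =====
def Claim_equal_venn_names : Prop := ∀ (named_sets : List (String × List Int)), Dom_venn_names named_sets → Spec_venn_names named_sets (venn_names named_sets)

-- ===== LEMMAS AND PROOFS =====

-- abbreviations for the two programs' building blocks
def pvS (d : PySem.Dict String (List Int)) (k : String) : List Int := d.getD k []

def pvI (d : PySem.Dict String (List Int)) (a : List Int) (l : List String) : List Int :=
  l.foldl (fun acc k' => PySem.Set.inter acc (d.getD k' [])) a

def pvU (d : PySem.Dict String (List Int)) (a : List Int) (l : List String) : List Int :=
  l.foldl (fun acc k' => PySem.Set.union acc (d.getD k' [])) a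

def pvFA (d : PySem.Dict String (List Int)) : List String → List Int
  | [] => []
  | k :: ks => pvI d (d.getD k []) ks

-- A's loop body as a function
def pvEmit (d : PySem.Dict String (List Int)) (names : PySem.Set String) (c : List String) :
    List String × List String × List Int :=
  let others := PySem.Set.diff names c
  let intersected : List Int :=
    match c with
    | [] => []
    | k :: ks => ks.foldl (fun acc k' => PySem.Set.inter acc (d.getD k' [])) (d.getD k [])
  let unioned : List Int :=
    match others with
    | [] => []
    | h :: t => t.foldl (fun acc k' => PySem.Set.union acc (d.getD k' [])) (d.getD h [])
  (c, others, PySem.Set.diff intersected unioned)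

-- B's inner-loop body as a function
def pvStepB (d : PySem.Dict String (List Int)) (cnt : PySem.Dict Int Int) (names : PySem.Set String)
    (i : Int) (st : PySem.Dict (List String) (List Int) × List (List String × List String × List Int))
    (c : List String) :
    PySem.Dict (List String) (List Int) × List (List String × List String × List Int) :=
  let v : List Int :=
    if i == 1 then d.getD (c.headD "") []
    else PySem.Set.inter (st.1.getD c.dropLast []) (d.getD (c.getLastD "") [])
  (st.1.insert c v,
   st.2 ++ [(c, PySem.Set.diff names c,
             PySem.Set.ofList (v.filter (fun x => cnt.getD x 0 == i)))])

-- A's per-combination union value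
def pvUA (d : PySem.Dict String (List Int)) (names : PySem.Set String) (c : List String) : List Int :=
  match PySem.Set.diff names c with
  | [] => []
  | h :: t => pvU d (d.getD h []) t

-- B's count dictionary
def pvCnt (d : PySem.Dict String (List Int)) (keys : List String) : PySem.Dict Int Int :=
  keys.foldl (fun m k => (d.getD k []).foldl (fun m x => m.insert x (m.getD x 0 + 1)) m)
    PySem.Dict.empty

-- every value of the dict built from the input is a Python set, hence duplicate-free
lemma pvVals_nodup_aux (l : List (String × List Int)) (d : PySem.Dict String (List Int))
    (hd : ∀ k, (d.getD k []).Nodup) (k : String) :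
    ((d.update (l.map (fun p => (p.1, PySem.Set.ofList p.2)))).getD k []).Nodup := by
  induction l generalizing d with
  | nil => exact hd k
  | cons p l ih =>
    simp only [List.map_cons, PySem.Dict.update, List.foldl_cons]
    exact ih (d.insert p.1 (PySem.Set.ofList p.2)) (fun k' => by
      rw [PySem.Dict.getD_insert]
      split
      · exact PySem.Set.nodup_ofList _
      · exact hd k')

lemma pvVals_nodup (ns : List (String × List Int)) (k : String) :
    ((pvToDict ns).getD k []).Nodup := by
  exact pvVals_nodup_aux ns PySem.Dict.empty (fun _ => by simp [PySem.Dict.getD_empty]) k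

lemma pvMem_I (d : PySem.Dict String (List Int)) (l : List String) (a : List Int) (x : Int) :
    x ∈ pvI d a l ↔ x ∈ a ∧ ∀ k ∈ l, x ∈ d.getD k [] := by
  induction l generalizing a with
  | nil => simp [pvI]
  | cons k ks ih =>
    simp only [pvI, List.foldl_cons] at *
    rw [ih]
    simp [PySem.Set.mem_inter]
    tauto

lemma pvNodup_I (d : PySem.Dict String (List Int)) (l : List String) (a : List Int)
    (ha : a.Nodup) : (pvI d a l).Nodup := by
  induction l generalizing a with
  | nil => simpa [pvI]
  | cons k ks ih =>
    simp only [pvI, List.foldl_cons] at *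
    exact ih _ (PySem.Set.nodup_inter _ _ ha)

lemma pvMem_U (d : PySem.Dict String (List Int)) (l : List String) (a : List Int) (x : Int) :
    x ∈ pvU d a l ↔ x ∈ a ∨ ∃ k ∈ l, x ∈ d.getD k [] := by
  induction l generalizing a with
  | nil => simp [pvU]
  | cons k ks ih =>
    simp only [pvU, List.foldl_cons] at *
    rw [ih]
    simp [PySem.Set.mem_union]
    tauto

lemma pvMem_UA (d : PySem.Dict String (List Int)) (names : PySem.Set String) (c : List String)
    (x : Int) : x ∈ pvUA d names c ↔ ∃ k ∈ PySem.Set.diff names c, x ∈ d.getD k [] := by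
  unfold pvUA
  cases h : PySem.Set.diff names c with
  | nil => simp
  | cons hd t =>
    rw [pvMem_U]
    constructor
    · rintro (hm | ⟨k, hk, hm⟩)
      · exact ⟨hd, by simp, hm⟩
      · exact ⟨k, by simp [hk], hm⟩
    · rintro ⟨k, hk, hm⟩
      rcases List.mem_cons.mp hk with rfl | hk
      · exact Or.inl hm
      · exact Or.inr ⟨k, hk, hm⟩

lemma pvFA_snoc (d : PySem.Dict String (List Int)) (c : List String) (h2 : 2 ≤ c.length) :
    pvFA d c = PySem.Set.inter (pvFA d c.dropLast) (d.getD (c.getLastD "") []) := by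
  cases c with
  | nil => simp at h2
  | cons k ks =>
    rcases List.eq_nil_or_concat ks with rfl | ⟨ks', y, rfl⟩
    · simp at h2
    · rw [List.concat_eq_append, show k :: (ks' ++ [y]) = (k :: ks') ++ [y] by simp, List.dropLast_concat,
        List.getLastD_eq_getLast?, List.getLast?_concat]
      show pvI d (d.getD k []) (ks' ++ [y]) = _
      rw [pvI, List.foldl_concat]
      rfl

lemma pvNodup_FA (ns : List (String × List Int)) (c : List String) :
    (pvFA (pvToDict ns) c).Nodup := by
  cases c with
  | nil => simp [pvFA]
  | cons k ks => exact pvNodup_I _ _ _ (pvVals_nodup ns k)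

lemma pvMem_FA (d : PySem.Dict String (List Int)) (c : List String) (hc : c ≠ []) (x : Int)
    (hx : x ∈ pvFA d c) : ∀ k ∈ c, x ∈ d.getD k [] := by
  cases c with
  | nil => exact absurd rfl hc
  | cons k ks =>
    rw [pvFA, pvMem_I] at hx
    intro k' hk'
    rcases List.mem_cons.mp hk' with h | h
    · exact h ▸ hx.1
    · exact hx.2 k' h

-- sum of a map splits along a boolean predicate
lemma pvSum_split {α : Type} (l : List α) (p : α → Bool) (f : α → Int) :
    (l.map f).sum = ((l.filter p).map f).sum + ((l.filter (fun a => !p a)).map f).sum := by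
  induction l with
  | nil => simp
  | cons a l ih =>
    by_cases h : p a <;> simp [h, ih] <;> ring

lemma pvSum_zero (l : List Int) (h : ∀ x ∈ l, 0 ≤ x) : l.sum = 0 ↔ ∀ x ∈ l, x = 0 := by
  induction l with
  | nil => simp
  | cons a l ih =>
    have ha := h a (by simp)
    have hl : 0 ≤ l.sum := List.sum_nonneg (fun x hx => h x (List.mem_cons_of_mem _ hx))
    simp only [List.sum_cons, List.mem_cons]
    constructor
    · intro h0
      have : a = 0 ∧ l.sum = 0 := by omega
      exact fun x hx => hx.elim (fun e => e ▸ this.1)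
        (fun hx => (ih (fun x hx => h x (List.mem_cons_of_mem _ hx))).mp this.2 x hx)
    · intro h0
      have : l.sum = 0 := (ih (fun x hx => h x (List.mem_cons_of_mem _ hx))).mpr
        (fun x hx => h0 x (Or.inr hx))
      rw [h0 a (Or.inl rfl), this]; ring

lemma pvCnt_getD_aux (d : PySem.Dict String (List Int)) (l : List String)
    (m : PySem.Dict Int Int) (x : Int) :
    (l.foldl (fun m k => (d.getD k []).foldl (fun m x => m.insert x (m.getD x 0 + 1)) m) m).getD x 0
      = m.getD x 0 + (l.map (fun k => ((d.getD k []).count x : Int))).sum := by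
  induction l generalizing m with
  | nil => simp
  | cons k l ih =>
    rw [List.foldl_cons, ih, PySem.Dict.getD_foldl_insert_add_one]
    simp [add_assoc]

lemma pvCnt_getD (d : PySem.Dict String (List Int)) (keys : List String) (x : Int) :
    (pvCnt d keys).getD x 0 = (keys.map (fun k => ((d.getD k []).count x : Int))).sum := by
  rw [pvCnt, pvCnt_getD_aux]
  simp [PySem.Dict.getD_empty]

-- the heart: for x in the intersection of c, total count = |c| iff x avoids every other set
lemma pvPoint (ns : List (String × List Int)) (c : List String) (x : Int)
    (hsub : c.Sublist (PySem.List.sorted (pvToDict ns).keys (fun k => k)))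
    (hne : c ≠ []) (hx : x ∈ pvFA (pvToDict ns) c) :
    ((pvCnt (pvToDict ns) (pvToDict ns).keys).getD x 0 = (c.length : Int)) ↔
      x ∉ pvUA (pvToDict ns) (PySem.Set.ofList (pvToDict ns).keys) c := by
  set d := pvToDict ns with hd
  set keys := d.keys with hkeys
  have hknd : keys.Nodup := PySem.Dict.nodup_keys_ofList _
  have hsknd : (PySem.List.sorted keys (fun k => k)).Nodup :=
    ((PySem.List.sorted_perm keys (fun k => k) false).nodup_iff).mpr hknd
  have hcnd : c.Nodup := List.Nodup.sublist hsub hsknd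
  have hcsub : ∀ k ∈ c, k ∈ keys := fun k hk =>
    (PySem.List.sorted_perm keys (fun k => k) false).mem_iff.mp (hsub.mem hk)
  have hnames : PySem.Set.ofList keys = keys := PySem.Set.ofList_eq_self_of_nodup keys hknd
  -- the complement list
  have hdiff : PySem.Set.diff (PySem.Set.ofList keys) c
      = keys.filter (fun k => !(PySem.Set.contains c k)) := by rw [hnames]; rfl
  set t : String → Int := fun k => ((d.getD k []).count x : Int) with ht
  -- count over keys splits into the c-part and the complement part
  have hsplit : (keys.map t).sum
      = ((keys.filter (fun k => PySem.Set.contains c k)).map t).sum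
        + ((keys.filter (fun k => !(PySem.Set.contains c k))).map t).sum :=
    pvSum_split keys _ t
  -- the c-part is a permutation of c
  have hperm : (keys.filter (fun k => PySem.Set.contains c k)).Perm c := by
    rw [List.perm_iff_count]
    intro a
    by_cases ha : a ∈ c
    · rw [List.count_eq_one_of_mem (hknd.filter _)
        (List.mem_filter.mpr ⟨hcsub a ha, (PySem.Set.contains_iff c a).mpr ha⟩),
        List.count_eq_one_of_mem hcnd ha]
    · rw [List.count_eq_zero.mpr (fun hmem => ha
        ((PySem.Set.contains_iff c a).mp (List.of_mem_filter hmem))),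
        List.count_eq_zero.mpr ha]
  -- on c every count is 1
  have hc1 : ∀ k ∈ c, t k = 1 := fun k hk => by
    rw [ht]
    simp only
    rw [List.count_eq_one_of_mem (pvVals_nodup ns k) (pvMem_FA d c hne x hx k hk)]
    rfl
  have hcsum : ((keys.filter (fun k => PySem.Set.contains c k)).map t).sum = (c.length : Int) := by
    rw [(hperm.map t).sum_eq]
    rw [List.map_congr_left hc1]
    simp
  -- complement part is nonnegative
  have hnn : ∀ y ∈ (keys.filter (fun k => !(PySem.Set.contains c k))).map t, 0 ≤ y := by
    rintro y hy
    obtain ⟨k, _, rfl⟩ := List.exists_of_mem_map hy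
    exact Int.natCast_nonneg _
  rw [pvCnt_getD, ← ht, hsplit, hcsum]
  rw [pvMem_UA, hdiff]
  constructor
  · intro h hmem
    obtain ⟨k, hk, hxk⟩ := hmem
    have h0 : ((keys.filter (fun k => !(PySem.Set.contains c k))).map t).sum = 0 := by omega
    have := (pvSum_zero _ hnn).mp h0 (t k) (List.mem_map_of_mem hk)
    rw [ht] at this
    simp only [Int.natCast_eq_zero, List.count_eq_zero] at this
    exact this hxk
  · intro h
    have h0 : ((keys.filter (fun k => !(PySem.Set.contains c k))).map t).sum = 0 := by
      rw [pvSum_zero _ hnn]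
      rintro y hy
      obtain ⟨k, hk, rfl⟩ := List.exists_of_mem_map hy
      rw [ht]
      simp only [Int.natCast_eq_zero, List.count_eq_zero]
      exact fun hxk => h ⟨k, hk, hxk⟩
    omega

-- invariants of B's fold: every stored entry is the corresponding intersection,
-- and all strictly smaller combinations are already stored
def pvCIP (d : PySem.Dict String (List Int)) (u : PySem.Dict (List String) (List Int)) : Prop :=
  ∀ c v, u.get? c = some v → v = pvFA d c

def pvPres (u : PySem.Dict (List String) (List Int)) (skeys : List String) (m : Nat) : Prop :=
  ∀ c : List String, c.Sublist skeys → c ≠ [] → c.length < m → (u.get? c).isSome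

lemma pvStep_eq (ns : List (String × List Int)) (i : Int) (hi : 1 ≤ i) (c : List String)
    (hsub : c.Sublist (PySem.List.sorted (pvToDict ns).keys (fun k => k)))
    (hlen : c.length = i.toNat)
    (u : PySem.Dict (List String) (List Int)) (o : List (List String × List String × List Int))
    (hCIP : pvCIP (pvToDict ns) u)
    (hPres : pvPres u (PySem.List.sorted (pvToDict ns).keys (fun k => k)) i.toNat) :
    pvStepB (pvToDict ns) (pvCnt (pvToDict ns) (pvToDict ns).keys)
        (PySem.Set.ofList (pvToDict ns).keys) i (u, o) c
      = (u.insert c (pvFA (pvToDict ns) c),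
         o ++ [pvEmit (pvToDict ns) (PySem.Set.ofList (pvToDict ns).keys) c]) := by
  set d := pvToDict ns with hd
  have hlen1 : 1 ≤ c.length := by omega
  have hne : c ≠ [] := List.ne_nil_of_length_pos (by omega)
  have hv : (if i == 1 then d.getD (c.headD "") []
      else PySem.Set.inter (u.getD c.dropLast []) (d.getD (c.getLastD "") []))
      = pvFA d c := by
    by_cases h1 : i = 1
    · subst h1
      rw [if_pos (by simp)]
      have hc1 : c.length = 1 := by omega
      obtain ⟨k, rfl⟩ := List.length_eq_one_iff.mp hc1
      rfl
    · rw [if_neg (by simpa using h1)]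
      have h2 : 2 ≤ c.length := by omega
      have hdl_sub : c.dropLast.Sublist (PySem.List.sorted (pvToDict ns).keys (fun k => k)) :=
        (List.dropLast_sublist c).trans hsub
      have hdl_len : c.dropLast.length = c.length - 1 := List.length_dropLast
      have hdl_ne : c.dropLast ≠ [] := List.ne_nil_of_length_pos (by omega)
      obtain ⟨w, hw⟩ := Option.isSome_iff_exists.mp (hPres c.dropLast hdl_sub hdl_ne (by omega))
      rw [PySem.Dict.getD_eq_get?_getD, hw]
      simp only [Option.getD_some]
      rw [hCIP _ _ hw, ← pvFA_snoc d c h2]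
  have hpt : ∀ x ∈ pvFA d c,
      ((pvCnt d d.keys).getD x 0 == i)
        = !(PySem.Set.contains (pvUA d (PySem.Set.ofList d.keys) c) x) := by
    intro x hx
    have hp := pvPoint ns c x hsub hne hx
    have hci : (c.length : Int) = i := by omega
    rw [hci] at hp
    cases hco : PySem.Set.contains (pvUA d (PySem.Set.ofList d.keys) c) x
    · have hnm : x ∉ pvUA d (PySem.Set.ofList d.keys) c := fun hm => by
        rw [(PySem.Set.contains_iff _ _).mpr hm] at hco
        cases hco
      simp only [Bool.not_false, beq_iff_eq]
      exact hp.mpr hnm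
    · have hmem : x ∈ pvUA d (PySem.Set.ofList d.keys) c := (PySem.Set.contains_iff _ _).mp hco
      simp only [Bool.not_true]
      rw [beq_eq_false_iff_ne]
      exact fun he => (hp.mp he) hmem
  have hemit : ((c, PySem.Set.diff (PySem.Set.ofList d.keys) c,
      PySem.Set.ofList ((pvFA d c).filter (fun x => (pvCnt d d.keys).getD x 0 == i)))
        : List String × List String × List Int)
      = pvEmit d (PySem.Set.ofList d.keys) c := by
    unfold pvEmit
    have hun : (match PySem.Set.diff (PySem.Set.ofList d.keys) c with
        | [] => ([] : List Int)
        | h :: t => t.foldl (fun acc k' => PySem.Set.union acc (d.getD k' [])) (d.getD h []))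
        = pvUA d (PySem.Set.ofList d.keys) c := by
      unfold pvUA
      cases PySem.Set.diff (PySem.Set.ofList d.keys) c <;> rfl
    simp only [hun]
    refine Prod.ext rfl (Prod.ext rfl ?_)
    show PySem.Set.ofList ((pvFA d c).filter (fun x => (pvCnt d d.keys).getD x 0 == i))
      = PySem.Set.diff (pvFA d c) (pvUA d (PySem.Set.ofList d.keys) c)
    rw [show PySem.Set.diff (pvFA d c) (pvUA d (PySem.Set.ofList d.keys) c)
      = (pvFA d c).filter (fun x => !(PySem.Set.contains (pvUA d (PySem.Set.ofList d.keys) c) x))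
      from rfl]
    rw [List.filter_congr hpt]
    exact PySem.Set.ofList_eq_self_of_nodup _ ((pvNodup_FA ns c).filter _)
  show (u.insert c _, o ++ [_]) = _
  rw [hv, hemit]

lemma pvInner (ns : List (String × List Int)) (i : Int) (hi : 1 ≤ i)
    (l : List (List String))
    (hl : ∀ c ∈ l, c.Sublist (PySem.List.sorted (pvToDict ns).keys (fun k => k))
      ∧ c.length = i.toNat) :
    ∀ (u : PySem.Dict (List String) (List Int)) (o : List (List String × List String × List Int)),
    pvCIP (pvToDict ns) u →
    pvPres u (PySem.List.sorted (pvToDict ns).keys (fun k => k)) i.toNat →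
    pvCIP (pvToDict ns)
        (l.foldl (pvStepB (pvToDict ns) (pvCnt (pvToDict ns) (pvToDict ns).keys)
          (PySem.Set.ofList (pvToDict ns).keys) i) (u, o)).1
    ∧ (∀ c', (u.get? c').isSome →
        ((l.foldl (pvStepB (pvToDict ns) (pvCnt (pvToDict ns) (pvToDict ns).keys)
          (PySem.Set.ofList (pvToDict ns).keys) i) (u, o)).1.get? c').isSome)
    ∧ (∀ c ∈ l,
        ((l.foldl (pvStepB (pvToDict ns) (pvCnt (pvToDict ns) (pvToDict ns).keys)
          (PySem.Set.ofList (pvToDict ns).keys) i) (u, o)).1.get? c).isSome)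
    ∧ (l.foldl (pvStepB (pvToDict ns) (pvCnt (pvToDict ns) (pvToDict ns).keys)
          (PySem.Set.ofList (pvToDict ns).keys) i) (u, o)).2
        = o ++ l.map (pvEmit (pvToDict ns) (PySem.Set.ofList (pvToDict ns).keys)) := by
  induction l with
  | nil => intro u o hCIP hPres; exact ⟨hCIP, fun _ h => h, by simp, by simp⟩
  | cons c l' ih =>
    intro u o hCIP hPres
    have hc := hl c List.mem_cons_self
    rw [List.foldl_cons, pvStep_eq ns i hi c hc.1 hc.2 u o hCIP hPres]
    have hCIP' : pvCIP (pvToDict ns) (u.insert c (pvFA (pvToDict ns) c)) := by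
      intro c' v hv
      rw [PySem.Dict.get?_insert] at hv
      split at hv
      · next he => rw [he]; exact (Option.some_inj.mp hv).symm
      · exact hCIP _ _ hv
    have hPres' : pvPres (u.insert c (pvFA (pvToDict ns) c))
        (PySem.List.sorted (pvToDict ns).keys (fun k => k)) i.toNat := by
      intro c' hs hne hlt
      rw [PySem.Dict.get?_insert]
      split
      · rfl
      · exact hPres c' hs hne hlt
    obtain ⟨h1, h2, h3, h4⟩ := ih (fun c hc => hl c (List.mem_cons_of_mem _ hc)) _ _ hCIP' hPres'
    refine ⟨h1, ?_, ?_, ?_⟩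
    · intro c' hs
      apply h2
      rw [PySem.Dict.get?_insert]
      split
      · rfl
      · exact hs
    · intro c'' hc''
      rcases List.mem_cons.mp hc'' with rfl | hmem
      · exact h2 _ (by rw [PySem.Dict.get?_insert_self]; rfl)
      · exact h3 _ hmem
    · rw [h4]; simp

lemma pvOuter (ns : List (String × List Int)) (n : Nat) :
    pvCIP (pvToDict ns)
      ((PySem.List.pyRange 1 ((n : Int) + 1)).foldl (fun st i =>
        (PySem.List.combinations (PySem.List.sorted (pvToDict ns).keys (fun k => k)) i.toNat).foldl
          (pvStepB (pvToDict ns) (pvCnt (pvToDict ns) (pvToDict ns).keys)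
            (PySem.Set.ofList (pvToDict ns).keys) i) st)
        (PySem.Dict.empty, ([] : List (List String × List String × List Int)))).1
    ∧ pvPres ((PySem.List.pyRange 1 ((n : Int) + 1)).foldl (fun st i =>
        (PySem.List.combinations (PySem.List.sorted (pvToDict ns).keys (fun k => k)) i.toNat).foldl
          (pvStepB (pvToDict ns) (pvCnt (pvToDict ns) (pvToDict ns).keys)
            (PySem.Set.ofList (pvToDict ns).keys) i) st)
        (PySem.Dict.empty, ([] : List (List String × List String × List Int)))).1
        (PySem.List.sorted (pvToDict ns).keys (fun k => k)) (n + 1)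
    ∧ ((PySem.List.pyRange 1 ((n : Int) + 1)).foldl (fun st i =>
        (PySem.List.combinations (PySem.List.sorted (pvToDict ns).keys (fun k => k)) i.toNat).foldl
          (pvStepB (pvToDict ns) (pvCnt (pvToDict ns) (pvToDict ns).keys)
            (PySem.Set.ofList (pvToDict ns).keys) i) st)
        (PySem.Dict.empty, ([] : List (List String × List String × List Int)))).2
      = (PySem.List.pyRange 1 ((n : Int) + 1)).flatMap (fun i =>
        (PySem.List.combinations (PySem.List.sorted (pvToDict ns).keys (fun k => k)) i.toNat).map
          (pvEmit (pvToDict ns) (PySem.Set.ofList (pvToDict ns).keys))) := by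
  induction n with
  | zero =>
    have h0 : PySem.List.pyRange 1 (((0 : Nat) : Int) + 1) = [] := by norm_num
    rw [h0]
    refine ⟨?_, ?_, rfl⟩
    · intro c v hv
      simp [PySem.Dict.get?_empty] at hv
    · intro c hs hne hlt
      exact absurd hlt (by have := List.length_pos_of_ne_nil hne; omega)
  | succ n ih =>
    have hcast : (((n + 1 : Nat)) : Int) + 1 = ((n : Int) + 1) + 1 := by push_cast; ring
    have hrange : PySem.List.pyRange 1 (((n + 1 : Nat) : Int) + 1)
        = PySem.List.pyRange 1 ((n : Int) + 1) ++ [(n : Int) + 1] := by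
      rw [hcast, PySem.List.pyRange_one_succ_right (by omega)]
    rw [hrange, List.foldl_append, List.flatMap_append]
    have htn : ((n : Int) + 1).toNat = n + 1 := by omega
    obtain ⟨ih1, ih2, ih3⟩ := ih
    obtain ⟨H1, H2, H3, H4⟩ := pvInner ns ((n : Int) + 1) (by omega)
      (PySem.List.combinations (PySem.List.sorted (pvToDict ns).keys (fun k => k))
        ((n : Int) + 1).toNat)
      (fun c hc => (PySem.List.mem_combinations_iff _ _ c).mp hc |>.imp id (fun h => h))
      _ _ ih1 (by rw [htn]; exact ih2)
    refine ⟨?_, ?_, ?_⟩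
    · simpa using H1
    · intro c hs hne hlt
      by_cases hsm : c.length < n + 1
      · have := ih2 c hs hne hsm
        have h' := H2 c this
        simpa using h'
      · have hcl : c.length = ((n : Int) + 1).toNat := by omega
        have hmem := (PySem.List.mem_combinations_iff
          (PySem.List.sorted (pvToDict ns).keys (fun k => k)) (((n : Int) + 1).toNat) c).mpr
          ⟨hs, hcl⟩
        have h' := H3 c hmem
        simpa using h'
    · simp only [List.foldl_cons, List.foldl_nil, List.flatMap_cons, List.flatMap_nil,
        List.append_nil]
      rw [H4, ih3]

theorem venn_names_spec : Claim_equal_venn_names := by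
  intro ns _
  show venn_names ns = venn_names_alt ns
  have hA : venn_names ns
      = (PySem.List.pyRange 1 (((pvToDict ns).keys.length : Int) + 1)).flatMap (fun i =>
        (PySem.List.combinations (PySem.List.sorted (pvToDict ns).keys (fun k => k)) i.toNat).map
          (pvEmit (pvToDict ns) (PySem.Set.ofList (pvToDict ns).keys))) := rfl
  have hB : venn_names_alt ns
      = ((PySem.List.pyRange 1 (((pvToDict ns).keys.length : Int) + 1)).foldl (fun st i =>
        (PySem.List.combinations (PySem.List.sorted (pvToDict ns).keys (fun k => k)) i.toNat).foldl
          (pvStepB (pvToDict ns) (pvCnt (pvToDict ns) (pvToDict ns).keys)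
            (PySem.Set.ofList (pvToDict ns).keys) i) st)
        (PySem.Dict.empty, ([] : List (List String × List String × List Int)))).2 := rfl
  rw [hA, hB, (pvOuter ns (pvToDict ns).keys.length).2.2]
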